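-- pv_equiv track=rewrite | github.com/riditaali/Datacamp_simple8challenges | PythonCodingChallenge_Datacamp.py | phrases
-- ===== SOURCE A (Python) =====
-- sentence1 = 'Loves me'
--
-- sentence2 = 'Loves me not'
--
-- def phrases(n):
--     disp = []
--     for i in range(1, n+1):
--         if i % 2 != 0:
--             disp.append(sentence1)
--         else:
--             disp.append(sentence2)
--     return ", ".join(disp)
-- ===== SOURCE B (Python) =====
-- sentence1 = 'Loves me'
--
-- sentence2 = 'Loves me not'
--
-- def phrases(n):
--     # build whole "Loves me, Loves me not" blocks by repetition instead of
--     # appending one phrase per index; odd n gets a final "Loves me".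
--     if n <= 0:
--         return ""
--     blocks = ["Loves me, Loves me not"] * (n // 2)
--     if n % 2 == 1:
--         blocks.append(sentence1)
--     return ", ".join(blocks)
-- ===== Notes on version B (the rewrite author's own statement) =====
-- stated objective: alternative
-- what changed: Replaces the per-index loop with parity test by repeating the whole 'Loves me, Loves me not' pair block half as many times, appending a final 'Loves me' when n is odd, behind an early empty-string return for nonpositive n.
import Mathlib
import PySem

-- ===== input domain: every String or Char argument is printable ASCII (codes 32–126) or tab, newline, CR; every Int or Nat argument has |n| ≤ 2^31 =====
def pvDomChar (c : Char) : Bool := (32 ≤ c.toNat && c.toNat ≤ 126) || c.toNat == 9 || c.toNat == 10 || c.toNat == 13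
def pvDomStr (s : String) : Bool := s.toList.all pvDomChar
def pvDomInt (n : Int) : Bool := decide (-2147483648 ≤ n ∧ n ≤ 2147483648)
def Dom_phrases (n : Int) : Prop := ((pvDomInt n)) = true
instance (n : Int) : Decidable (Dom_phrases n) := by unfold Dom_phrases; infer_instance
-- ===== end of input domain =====

-- B builds n/2 whole "Loves me, Loves me not" blocks plus an odd tail instead of A's per-index loop (alternative decomposition, same cost).

-- ===== PORT A =====
def sentence1 : String := "Loves me"

def sentence2 : String := "Loves me not"

def phrases (n : Int) : String :=
  let disp := (PySem.List.pyRange 1 (n + 1) 1).foldl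
    (fun disp i => if PySem.Int.mod i 2 ≠ 0 then disp ++ [sentence1] else disp ++ [sentence2])
    ([] : List String)
  PySem.Str.join ", " disp

-- ===== PORT B =====
def phrases_alt (n : Int) : String :=
  if n ≤ 0 then ""
  else
    let blocks := PySem.List.pyRepeat ["Loves me, Loves me not"] (PySem.Int.floordiv n 2)
    let blocks := if PySem.Int.mod n 2 = 1 then blocks ++ [sentence1] else blocks
    PySem.Str.join ", " blocks

-- ===== PRECONDITION & SPEC =====
def Spec_phrases (n : Int) (out : String) : Prop := out = phrases_alt n
instance (n : Int) (out : String) : Decidable (Spec_phrases n out) := by unfold Spec_phrases; infer_instance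

-- ===== CLAIM (what is proved, stated in full; the proofs are below) =====
def Claim_equal_phrases : Prop := ∀ (n : Int), Dom_phrases n → Spec_phrases n (phrases n)

-- ===== LEMMAS AND PROOFS =====

-- the alternating phrase list, built front-first; `odd` says whether the next index is odd
def altL : Nat → Bool → List String
  | 0, _ => []
  | m + 1, odd => (if odd then sentence1 else sentence2) :: altL m (!odd)

-- ", ".join on the char level
def Jc (xs : List String) : List Char :=
  PySem.Chars.join (", ".toList) (xs.map String.toList)

theorem mod2_eq (a : Int) : PySem.Int.mod a 2 = a % 2 := by
  simp [PySem.Int.mod, Int.fmod_eq_emod]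

theorem altL_ne_nil (m : Nat) (b : Bool) (h : m ≠ 0) : altL m b ≠ [] := by
  cases m with
  | zero => exact absurd rfl h
  | succ k => simp [altL]

theorem join_cons_ne (sep p : List Char) (rest : List (List Char)) (h : rest ≠ []) :
    PySem.Chars.join sep (p :: rest) = p ++ sep ++ PySem.Chars.join sep rest := by
  cases rest with
  | nil => exact absurd rfl h
  | cons q rs => exact PySem.Chars.join_cons_cons sep p q rs

theorem foldA (m : Nat) : ∀ (a : Int) (acc : List String),
    (PySem.List.pyRange a (a + m) 1).foldl
      (fun disp i => if PySem.Int.mod i 2 ≠ 0 then disp ++ [sentence1] else disp ++ [sentence2])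
      acc = acc ++ altL m (decide (a % 2 = 1)) := by
  induction m with
  | zero => intro a acc; rw [PySem.List.pyRange_one_eq_nil (by omega)]; simp [altL]
  | succ k ih =>
    intro a acc
    rw [PySem.List.pyRange_one_cons (by push_cast; omega)]
    have hstep : (a + ((k : Nat) + 1 : Nat) : Int) = (a + 1) + k := by push_cast; omega
    rw [hstep]
    simp only [List.foldl_cons, ih (a + 1) _]
    have h2 := Int.emod_two_eq a
    have h3 : (a + 1) % 2 = 1 - a % 2 := by omega
    rcases h2 with h | h <;>
      simp [altL, h, h3]

theorem joinB (m : Nat) :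
    Jc (List.replicate (m / 2) "Loves me, Loves me not" ++
        (if m % 2 = 1 then [sentence1] else [])) = Jc (altL m true) := by
  induction m using Nat.strong_induction_on with
  | _ m ih =>
    match m with
    | 0 => decide
    | 1 => decide
    | (k + 2) =>
      have h2 : (k + 2) / 2 = k / 2 + 1 := by omega
      have h3 : (k + 2) % 2 = k % 2 := by omega
      rw [h2, h3, List.replicate_succ]
      match k with
      | 0 => decide
      | (k' + 1) =>
        set tail := (if (k' + 1) % 2 = 1 then [sentence1] else ([] : List String)) with htail
        have hxs : List.replicate ((k' + 1) / 2) "Loves me, Loves me not" ++ tail ≠ [] := by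
          by_cases hp : (k' + 1) % 2 = 1
          · rw [htail, if_pos hp]; simp
          · rw [htail, if_neg hp]
            simp only [List.append_nil, ne_eq, List.replicate_eq_nil_iff]
            omega
        have halt : altL (k' + 1) true ≠ [] := altL_ne_nil _ _ (by omega)
        have hA : altL (k' + 3) true = sentence1 :: sentence2 :: altL (k' + 1) true := by
          simp [altL]
        rw [List.cons_append, hA]
        -- unfold the joins one cons at a time
        have e1 : Jc ("Loves me, Loves me not" ::
            (List.replicate ((k' + 1) / 2) "Loves me, Loves me not" ++ tail)) =
            "Loves me, Loves me not".toList ++ ", ".toList ++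
              Jc (List.replicate ((k' + 1) / 2) "Loves me, Loves me not" ++ tail) := by
          unfold Jc
          rw [List.map_cons, join_cons_ne _ _ _ (by simpa using hxs)]
        have e2 : Jc (sentence1 :: sentence2 :: altL (k' + 1) true) =
            sentence1.toList ++ ", ".toList ++
              (sentence2.toList ++ ", ".toList ++ Jc (altL (k' + 1) true)) := by
          unfold Jc
          rw [List.map_cons, join_cons_ne _ _ _ (by simp),
              List.map_cons, join_cons_ne _ _ _ (by simpa using halt)]
        have hB : "Loves me, Loves me not".toList =
            sentence1.toList ++ ", ".toList ++ sentence2.toList := by decide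
        rw [e1, e2, ih (k' + 1) (by omega), hB]
        simp [List.append_assoc]

theorem join_eq_ofList (xs : List String) : PySem.Str.join ", " xs = String.ofList (Jc xs) := rfl

theorem phrases_eq_pos (n : Int) (hn : 0 < n) :
    phrases n = String.ofList (Jc (altL n.toNat true)) := by
  show PySem.Str.join ", "
      ((PySem.List.pyRange 1 (n + 1) 1).foldl
        (fun disp i => if PySem.Int.mod i 2 ≠ 0 then disp ++ [sentence1] else disp ++ [sentence2])
        ([] : List String)) = _
  rw [show n + 1 = 1 + (n.toNat : Int) by omega, foldA n.toNat 1 [],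
      show (decide ((1 : Int) % 2 = 1)) = true from by decide]
  rw [List.nil_append, join_eq_ofList]

theorem phrases_alt_eq_pos (n : Int) (hn : 0 < n) :
    phrases_alt n = String.ofList (Jc (List.replicate (n.toNat / 2) "Loves me, Loves me not" ++
      (if n.toNat % 2 = 1 then [sentence1] else []))) := by
  unfold phrases_alt
  rw [if_neg (by omega)]
  show PySem.Str.join ", "
      (if PySem.Int.mod n 2 = 1
        then PySem.List.pyRepeat ["Loves me, Loves me not"] (PySem.Int.floordiv n 2) ++ [sentence1]
        else PySem.List.pyRepeat ["Loves me, Loves me not"] (PySem.Int.floordiv n 2)) = _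
  rw [PySem.List.pyRepeat_singleton]
  have hdiv : (PySem.Int.floordiv n 2).toNat = n.toNat / 2 := by
    unfold PySem.Int.floordiv
    rw [Int.fdiv_eq_ediv, if_pos (Or.inl (by norm_num))]
    omega
  rw [hdiv]
  have hmod : (PySem.Int.mod n 2 = 1) ↔ (n.toNat % 2 = 1) := by rw [mod2_eq]; omega
  by_cases hp : n.toNat % 2 = 1
  · rw [if_pos (hmod.mpr hp), if_pos hp, join_eq_ofList]
  · rw [if_neg (fun h => hp (hmod.mp h)), if_neg hp, join_eq_ofList, List.append_nil]

-- ===== VERDICT (by name: the statement is the Claim_ definition above) =====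
theorem phrases_spec : Claim_equal_phrases := by
  intro n _
  unfold Spec_phrases
  by_cases hn : n ≤ 0
  · show PySem.Str.join ", "
        ((PySem.List.pyRange 1 (n + 1) 1).foldl
          (fun disp i => if PySem.Int.mod i 2 ≠ 0 then disp ++ [sentence1] else disp ++ [sentence2])
          ([] : List String)) = phrases_alt n
    rw [PySem.List.pyRange_one_eq_nil (by omega), List.foldl_nil]
    unfold phrases_alt
    rw [if_pos hn]
    decide
  · rw [phrases_eq_pos n (by omega), phrases_alt_eq_pos n (by omega)]
    exact congrArg String.ofList (joinB n.toNat).symm
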